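-- pv_equiv track=rewrite | github.com/drizztSun/common_project | PythonLeetcode/Leetcode/887_SuperEggDrop.py | doit_math_binary_search
-- ===== SOURCE A (Python) =====
-- def doit_math_binary_search(K, N):
--     def f(x):
--         ans = 0
--         r = 1
--         for i in range(1, K+1):
--             r *= x-i+1
--             r //= i
--             ans += r
--             if ans >= N:
--                 break
--         return ans
--
--     lo, hi = 1, N
--     while lo < hi:
--         mi = (lo + hi) // 2
--         if f(mi) < N:
--             lo = mi + 1
--         else:
--             hi = mi
--     return lo
-- ===== SOURCE B (Python) =====
-- def doit_math_binary_search(K, N):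
--     # Incremental DP over the number of moves: dp[i] is the maximal number of
--     # floors distinguishable with i eggs in m moves; try m = 1, 2, ... and
--     # return the first move count whose coverage reaches N.
--     if K == 1:
--         # a single egg forces a bottom-up linear scan (but always one move)
--         return max(N, 1)
--     # more than N.bit_length() eggs never help: N floors are always covered
--     # within bit_length(N) moves, and extra eggs beyond the move count are idle
--     k = K if K < N.bit_length() else N.bit_length()
--     dp = [0] * (k + 1)
--     m = 0
--     while True:
--         m += 1
--         dp = [0] + [dp[i - 1] + dp[i] + 1 for i in range(1, k + 1)]
--         if dp[k] >= N:
--             return m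
-- ===== Notes on version B (the rewrite author's own statement) =====
-- stated objective: faster
-- what changed: A binary-searches the move count, re-evaluating a capped binomial-sum coverage helper at each probe; B runs the classic incremental egg-drop DP, growing one coverage row (dp[i] = floors distinguishable with i eggs in m moves) move by move and returning the first move count whose coverage reaches N, with an O(1) one-egg shortcut and the egg count capped at N.bit_length() since more eggs never help.
-- outside the precondition, e.g. on doit_math_binary_search(0, 5): A returns 5, B does not finish within the time limit; on doit_math_binary_search(-1, 5): A returns 5, B does not finish within the time limit
import Mathlib
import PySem

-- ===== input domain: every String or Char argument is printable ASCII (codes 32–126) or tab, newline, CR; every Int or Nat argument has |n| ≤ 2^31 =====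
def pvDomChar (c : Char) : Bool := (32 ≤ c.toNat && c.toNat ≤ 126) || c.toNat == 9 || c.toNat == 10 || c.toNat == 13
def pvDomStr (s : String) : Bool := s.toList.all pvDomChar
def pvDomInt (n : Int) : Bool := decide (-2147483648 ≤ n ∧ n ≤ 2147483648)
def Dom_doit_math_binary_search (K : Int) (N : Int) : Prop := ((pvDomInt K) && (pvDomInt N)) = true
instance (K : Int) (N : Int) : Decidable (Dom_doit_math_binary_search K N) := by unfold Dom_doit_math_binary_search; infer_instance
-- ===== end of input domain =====

-- B replaces A's binary search over move counts (with its binomial-sum coverage helper) by the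
-- incremental egg-drop DP that grows the coverage row one move at a time, returning the first
-- move count whose coverage reaches N; alternative algorithm, same return values on K ≥ 1.

-- ===== PORT A =====
-- inner loop of A's helper f: for i in range(1, K+1): r *= x-i+1; r //= i; ans += r; break if ans >= N
def fLoopA (N x : Int) : List Int → Int → Int → Int
  | [], _, ans => ans
  | i :: rest, r, ans =>
    let r' := PySem.Int.floordiv (r * (x - i + 1)) i
    let ans' := ans + r'
    if ans' ≥ N then ans' else fLoopA N x rest r' ans'

def fA (K N x : Int) : Int := fLoopA N x (PySem.List.pyRange 1 (K + 1) 1) 1 0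

-- while lo < hi: mi = (lo+hi)//2; if f(mi) < N: lo = mi+1 else hi = mi
def bsA (K N lo hi : Int) : Int :=
  if h : lo < hi then
    let mi := PySem.Int.floordiv (lo + hi) 2
    if fA K N mi < N then bsA K N (mi + 1) hi else bsA K N lo mi
  else lo
termination_by (hi - lo).toNat
decreasing_by
  · have := PySem.Int.floordiv_two_mid_bounds (le_of_lt h)
    have h2 : PySem.Int.floordiv (lo + hi) 2 < hi := by
      rw [PySem.Int.floordiv_lt_iff_lt_mul (by omega : (0:Int) < 2)]; omega
    omega
  · have := PySem.Int.floordiv_two_mid_bounds (le_of_lt h)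
    have h2 : PySem.Int.floordiv (lo + hi) 2 < hi := by
      rw [PySem.Int.floordiv_lt_iff_lt_mul (by omega : (0:Int) < 2)]; omega
    omega

def doit_math_binary_search (K : Int) (N : Int) : Int := bsA K N 1 N

-- ===== PORT B =====
-- one DP step: dp = [0] + [dp[i-1] + dp[i] + 1 for i in range(1, k+1)]
def dpStepB (k : Int) (dp : List Int) : List Int :=
  0 :: (PySem.List.pyRange 1 (k + 1) 1).map
    (fun i => PySem.List.pyGetD dp (i - 1) 0 + PySem.List.pyGetD dp i 0 + 1)

-- while True: m += 1; dp = step dp; return m if dp[k] >= N.  Fuel N.toNat+1 ample: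
-- dp[1] = m after m steps, so for k ≥ 1 the test succeeds after at most max(N,1) iterations.
def bLoopB (k N : Int) : Nat → List Int → Int → Int
  | 0, _, m => m
  | fuel + 1, dp, m =>
    let dp' := dpStepB k dp
    if PySem.List.pyGetD dp' k 0 ≥ N then m + 1 else bLoopB k N fuel dp' (m + 1)

def doit_math_binary_search_alt (K : Int) (N : Int) : Int :=
  if K = 1 then max N 1
  else
    -- k = K if K < N.bit_length() else N.bit_length()
    let k : Int := if K < (PySem.Int.bitLength N : Int) then K else (PySem.Int.bitLength N : Int)
    bLoopB k N (N.toNat + 1) (List.replicate (k + 1).toNat 0) 0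

-- ===== PRECONDITION & SPEC =====
-- Pre_ excludes K ≤ 0: there B's while-loop never terminates (K = 0, N ≥ 2) or its row is
-- empty and dp[k] raises; K ≥ 1 is the egg-drop problem's natural domain.
def Pre_doit_math_binary_search (K : Int) (N : Int) : Prop := 1 ≤ K
instance (K : Int) (N : Int) : Decidable (Pre_doit_math_binary_search K N) := by
  unfold Pre_doit_math_binary_search; infer_instance

def pvWitness_doit_math_binary_search : Int × Int := (2, 5)

def Spec_doit_math_binary_search (K : Int) (N : Int) (out : Int) : Prop :=
  out = doit_math_binary_search_alt K N
instance (K : Int) (N : Int) (out : Int) : Decidable (Spec_doit_math_binary_search K N out) := by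
  unfold Spec_doit_math_binary_search; infer_instance

-- ===== CLAIM (what is proved, stated in full; the proofs are below) =====
def Claim_equal_doit_math_binary_search : Prop := ∀ (K : Int) (N : Int), Dom_doit_math_binary_search K N → Pre_doit_math_binary_search K N → Spec_doit_math_binary_search K N (doit_math_binary_search K N)

-- ===== LEMMAS AND PROOFS =====

-- C(x, i) for a nonnegative integer x, as an Int
def chooseZ (x : Int) (i : Nat) : Int := (x.toNat.choose i : Int)

-- Ssum x j = Σ_{i=1..j} C(x, i): floors coverable with j eggs and x moves
def Ssum (x : Int) : Nat → Int
  | 0 => 0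
  | j + 1 => Ssum x j + chooseZ x (j + 1)

lemma chooseZ_nonneg (x : Int) (i : Nat) : 0 ≤ chooseZ x i := Int.natCast_nonneg _

lemma chooseZ_zero (x : Int) : chooseZ x 0 = 1 := by simp [chooseZ]

lemma chooseZ_one (x : Int) (hx : 0 ≤ x) : chooseZ x 1 = x := by
  simp [chooseZ, Nat.choose_one_right, Int.toNat_of_nonneg hx]

lemma chooseZ_eq_zero (x : Int) {i : Nat} (h : x.toNat < i) : chooseZ x i = 0 := by
  simp [chooseZ, Nat.choose_eq_zero_of_lt h]

-- the exact-division step of A's product formula: C(x,n) * (x-n) // (n+1) = C(x,n+1)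
lemma chooseZ_step (x : Int) (hx : 0 ≤ x) (n : Nat) :
    PySem.Int.floordiv (chooseZ x n * (x - (n : Int))) ((n : Int) + 1) = chooseZ x (n + 1) := by
  rcases le_or_gt n x.toNat with h | h
  · have hid : (x.toNat.choose n : Int) * (x - (n : Int)) =
        (x.toNat.choose (n + 1) : Int) * ((n : Int) + 1) := by
      have hrec := Nat.choose_succ_right_eq x.toNat n
      have hsub : ((x.toNat - n : Nat) : Int) = x - (n : Int) := by omega
      calc (x.toNat.choose n : Int) * (x - (n : Int))
          = ((x.toNat.choose n * (x.toNat - n) : Nat) : Int) := by push_cast [hsub]; ring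
        _ = ((x.toNat.choose (n + 1) * (n + 1) : Nat) : Int) := by rw [← hrec]
        _ = (x.toNat.choose (n + 1) : Int) * ((n : Int) + 1) := by push_cast; ring
    rw [chooseZ, hid, PySem.Int.floordiv_eq_ediv_of_pos (by omega)]
    rw [Int.mul_ediv_cancel _ (by omega)]
    rfl
  · rw [chooseZ, Nat.choose_eq_zero_of_lt h]
    rw [chooseZ, Nat.choose_eq_zero_of_lt (by omega)]
    rw [PySem.Int.floordiv_eq_ediv_of_pos (by omega : (0:Int) < (n:Int)+1)]
    simp

lemma Ssum_zero_left (j : Nat) : Ssum 0 j = 0 := by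
  induction j with
  | zero => rfl
  | succ j ih => simp [Ssum, ih, chooseZ]

lemma Ssum_mono_j (x : Int) {a b : Nat} (h : a ≤ b) : Ssum x a ≤ Ssum x b := by
  induction b with
  | zero =>
    have : a = 0 := by omega
    subst this; exact le_refl _
  | succ b ih =>
    rcases Nat.lt_or_ge a (b + 1) with h' | h'
    · have h1 := ih (by omega)
      have h2 := chooseZ_nonneg x (b + 1)
      simp only [Ssum]; omega
    · have : a = b + 1 := by omega
      subst this; exact le_refl _

lemma Ssum_mono_x {x y : Int} (_hx : 0 ≤ x) (hxy : x ≤ y) (j : Nat) : Ssum x j ≤ Ssum y j := by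
  induction j with
  | zero => exact le_refl _
  | succ j ih =>
    have hc : chooseZ x (j + 1) ≤ chooseZ y (j + 1) := by
      unfold chooseZ
      exact_mod_cast Nat.choose_le_choose (j + 1) (Int.toNat_le_toNat hxy)
    simp only [Ssum]; omega

lemma Ssum_stab (x : Int) {a b : Nat} (ha : x.toNat ≤ a) (hab : a ≤ b) :
    Ssum x b = Ssum x a := by
  induction b with
  | zero =>
    have : a = 0 := by omega
    subst this; rfl
  | succ b ih =>
    rcases Nat.lt_or_ge a (b + 1) with h' | h'
    · have hz : chooseZ x (b + 1) = 0 := chooseZ_eq_zero x (by omega)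
      simp [Ssum, hz, ih (by omega)]
    · have : a = b + 1 := by omega
      subst this; rfl

lemma Ssum_one (x : Int) (hx : 0 ≤ x) : Ssum x 1 = x := by
  simp [Ssum, chooseZ_one x hx]

lemma Ssum_pascal (m : Int) (hm : 0 ≤ m) (k : Nat) :
    Ssum (m + 1) (k + 1) = Ssum m (k + 1) + Ssum m k + 1 := by
  have htn : (m + 1).toNat = m.toNat + 1 := by omega
  induction k with
  | zero =>
    simp [Ssum, chooseZ_one _ (by omega : (0:Int) ≤ m + 1), chooseZ_one _ hm]
  | succ k ih =>
    have hch : chooseZ (m + 1) (k + 2) = chooseZ m (k + 2) + chooseZ m (k + 1) := by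
      simp only [chooseZ, htn, Nat.choose_succ_succ]
      push_cast; ring
    calc Ssum (m + 1) (k + 2) = Ssum (m + 1) (k + 1) + chooseZ (m + 1) (k + 2) := rfl
      _ = (Ssum m (k + 1) + Ssum m k + 1) + (chooseZ m (k + 2) + chooseZ m (k + 1)) := by
          rw [ih, hch]
      _ = Ssum m (k + 2) + Ssum m (k + 1) + 1 := by simp [Ssum]; ring

-- Ssum as a Finset sum, for the closed row sum
lemma Ssum_eq_sum (x : Int) (j : Nat) :
    Ssum x j = ∑ i ∈ Finset.range j, chooseZ x (i + 1) := by
  induction j with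
  | zero => simp [Ssum]
  | succ j ih => rw [Finset.sum_range_succ, ← ih]; rfl

-- the full row: Σ_{i=1..t} C(t,i) = 2^t - 1
lemma Ssum_full (t : Nat) : Ssum (t : Int) t = 2 ^ t - 1 := by
  have htn : ((t : Int)).toNat = t := by omega
  have hnat : (∑ i ∈ Finset.range t, t.choose (i + 1)) + 1 = 2 ^ t := by
    have h1 := Nat.sum_range_choose t
    have h2 : ∑ i ∈ Finset.range (t + 1), t.choose i
        = (∑ i ∈ Finset.range t, t.choose (i + 1)) + t.choose 0 := Finset.sum_range_succ' _ t
    simp [h2] at h1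
    omega
  have hcast : (∑ i ∈ Finset.range t, chooseZ (t : Int) (i + 1))
      = ((∑ i ∈ Finset.range t, t.choose (i + 1) : Nat) : Int) := by
    rw [Nat.cast_sum]
    refine Finset.sum_congr rfl fun i _ => ?_
    simp [chooseZ, htn]
  rw [Ssum_eq_sum, hcast]
  have h6 : ((2 : Int)) ^ t = ((2 ^ t : Nat) : Int) := by push_cast; ring
  have h7 : (((∑ i ∈ Finset.range t, t.choose (i + 1)) : Nat) : Int) + 1 = ((2 ^ t : Nat) : Int) := by
    exact_mod_cast hnat
  rw [h6]
  omega

-- the predicate both programs decide: with x moves and K eggs, N floors are covered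
def CoverP (K N x : Int) : Prop := N ≤ Ssum x K.toNat

lemma CoverP_mono {K N x y : Int} (hx : 0 ≤ x) (hxy : x ≤ y) (h : CoverP K N x) :
    CoverP K N y := le_trans h (Ssum_mono_x hx hxy _)

lemma CoverP_at_N {K N : Int} (hK : 1 ≤ K) (hN : 1 ≤ N) : CoverP K N N := by
  unfold CoverP
  have h1 : Ssum N 1 ≤ Ssum N K.toNat := Ssum_mono_j N (by omega)
  have h2 : Ssum N 1 = N := Ssum_one N (by omega)
  omega

-- ===== A-side characterisation =====

lemma fLoopA_iff (K N x : Int) (hx : 0 ≤ x) :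
    ∀ (c jn : Nat), (jn : Int) + (c : Int) = K →
      ((N ≤ fLoopA N x (PySem.List.pyRange ((jn : Int) + 1) (K + 1) 1) (chooseZ x jn) (Ssum x jn))
        ↔ N ≤ Ssum x (jn + c)) := by
  intro c
  induction c with
  | zero =>
    intro jn hj
    rw [PySem.List.pyRange_one_eq_nil (by omega)]
    simp [fLoopA]
  | succ c ih =>
    intro jn hj
    rw [PySem.List.pyRange_one_cons (by omega : (jn : Int) + 1 < K + 1)]
    simp only [fLoopA]
    have hr' : PySem.Int.floordiv (chooseZ x jn * (x - ((jn : Int) + 1) + 1)) ((jn : Int) + 1)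
        = chooseZ x (jn + 1) := by
      have harg : x - ((jn : Int) + 1) + 1 = x - (jn : Int) := by ring
      rw [harg]; exact chooseZ_step x hx jn
    rw [hr']
    have hans : Ssum x jn + chooseZ x (jn + 1) = Ssum x (jn + 1) := rfl
    rw [hans]
    have hidx : jn + (c + 1) = (jn + 1) + c := by omega
    rw [hidx]
    by_cases hb : Ssum x (jn + 1) ≥ N
    · rw [if_pos hb]
      constructor
      · intro _; exact le_trans hb (Ssum_mono_j x (by omega))
      · intro _; exact hb
    · rw [if_neg hb]
      have h2 : ((jn : Int) + 1) + 1 = (((jn + 1 : Nat)) : Int) + 1 := by push_cast; ring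
      rw [h2]
      exact ih (jn + 1) (by push_cast; push_cast at hj; omega)

lemma fA_iff (K N x : Int) (hx : 0 ≤ x) (hK : 1 ≤ K) :
    (N ≤ fA K N x) ↔ CoverP K N x := by
  unfold fA CoverP
  have h0 : (PySem.List.pyRange 1 (K + 1) 1) = PySem.List.pyRange (((0 : Nat) : Int) + 1) (K + 1) 1 := by
    norm_num
  rw [h0]
  have := fLoopA_iff K N x hx K.toNat 0 (by omega)
  simpa [chooseZ_zero, Ssum] using this

-- binary search returns the least x ≥ 1 with CoverP, given the invariants
lemma bsA_char (K N : Int) (hK : 1 ≤ K) :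
    ∀ (c : Nat) (lo hi : Int), (hi - lo).toNat = c → 1 ≤ lo → lo ≤ hi →
      (∀ y, 1 ≤ y → y < lo → ¬ CoverP K N y) → CoverP K N hi →
      (1 ≤ bsA K N lo hi ∧ CoverP K N (bsA K N lo hi) ∧
        ∀ y, 1 ≤ y → y < bsA K N lo hi → ¬ CoverP K N y) := by
  intro c
  induction c using Nat.strong_induction_on with
  | _ c ih =>
    intro lo hi hc hlo hlohi hinv hhi
    rw [bsA]
    by_cases h : lo < hi
    · rw [dif_pos h]
      have hmid := PySem.Int.floordiv_two_mid_bounds (le_of_lt h)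
      have hmilt : PySem.Int.floordiv (lo + hi) 2 < hi := by
        rw [PySem.Int.floordiv_lt_iff_lt_mul (by omega : (0:Int) < 2)]; omega
      set mi := PySem.Int.floordiv (lo + hi) 2 with hmi
      by_cases hf : fA K N mi < N
      · rw [if_pos hf]
        have hnc : ¬ CoverP K N mi := by
          rw [← fA_iff K N mi (by omega) hK]; omega
        refine ih (hi - (mi + 1)).toNat (by omega) (mi + 1) hi rfl (by omega) (by omega) ?_ hhi
        intro y hy1 hy2 hcy
        rcases lt_or_ge y lo with h' | h'
        · exact hinv y hy1 h' hcy
        · exact hnc (CoverP_mono (by omega) (by omega) hcy)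
      · rw [if_neg hf]
        have hcmi : CoverP K N mi := by
          rw [← fA_iff K N mi (by omega) hK]; omega
        exact ih (mi - lo).toNat (by omega) lo mi rfl hlo (by omega) hinv hcmi
    · rw [dif_neg h]
      have : lo = hi := by omega
      subst this
      exact ⟨hlo, hhi, hinv⟩

-- A's result is the least x ≥ 1 covering N floors (K ≥ 1, N ≥ 1)
lemma A_char (K N : Int) (hK : 1 ≤ K) (hN : 1 ≤ N) :
    (1 ≤ doit_math_binary_search K N ∧ CoverP K N (doit_math_binary_search K N) ∧
      ∀ y, 1 ≤ y → y < doit_math_binary_search K N → ¬ CoverP K N y) := by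
  unfold doit_math_binary_search
  exact bsA_char K N hK (N - 1).toNat 1 N rfl (le_refl _) hN
    (by intro y h1 h2; omega) (CoverP_at_N hK hN)

-- ===== B-side characterisation =====

-- the DP row after m moves, with k eggs
def Drow (k m : Int) : List Int := (List.range (k.toNat + 1)).map (fun i => Ssum m i)

lemma Drow_init (k : Int) (hk : 0 ≤ k) : List.replicate (k + 1).toNat (0 : Int) = Drow k 0 := by
  unfold Drow
  have hlen : (k + 1).toNat = k.toNat + 1 := by omega
  rw [hlen]
  apply List.ext_getElem
  · simp
  · intro i h1 h2
    simp [Ssum_zero_left]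

lemma Drow_getD (k m : Int) (i : Nat) (hi : i < k.toNat + 1) :
    (Drow k m).getD i 0 = Ssum m i := by
  unfold Drow
  rw [List.getD_eq_getElem?_getD]
  simp [hi]

lemma Drow_get_k (k m : Int) (hk : 0 ≤ k) :
    PySem.List.pyGetD (Drow k m) k 0 = Ssum m k.toNat := by
  have h : k = ((k.toNat : Nat) : Int) := by omega
  rw [h, PySem.List.pyGetD_natCast]
  exact Drow_getD k m k.toNat (by omega)

lemma dpStepB_Drow (k m : Int) (hk : 1 ≤ k) (hm : 0 ≤ m) :
    dpStepB k (Drow k m) = Drow k (m + 1) := by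
  have hkk : (k + 1 - 1).toNat = k.toNat := by omega
  apply List.ext_getElem
  · simp [dpStepB, Drow, PySem.List.length_pyRange_one]
  · intro i h1 h2
    match i with
    | 0 =>
      simp [dpStepB, Drow, Ssum]
    | j + 1 =>
      have hj : j < k.toNat := by
        simp [dpStepB, PySem.List.length_pyRange_one] at h1
        omega
      have hjr : j < (PySem.List.pyRange 1 (k + 1) 1).length := by
        rw [PySem.List.length_pyRange_one, hkk]; exact hj
      simp only [dpStepB, List.getElem_cons_succ, List.getElem_map]
      have hrg : (PySem.List.pyRange 1 (k + 1) 1)[j] = 1 + (j : Int) :=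
        PySem.List.getElem_pyRange_one ..
      rw [hrg]
      have e1 : (1 : Int) + (j : Int) - 1 = ((j : Nat) : Int) := by ring
      have e2 : (1 : Int) + (j : Int) = (((j + 1 : Nat)) : Int) := by push_cast; ring
      rw [e1, e2, PySem.List.pyGetD_natCast, PySem.List.pyGetD_natCast]
      rw [Drow_getD k m j (by omega), Drow_getD k m (j + 1) (by omega)]
      have hR : (Drow k (m + 1))[j + 1]'h2 = Ssum (m + 1) (j + 1) := by
        simp [Drow]
      rw [hR, Ssum_pascal m hm j]
      ring

lemma Ssum_nonneg (x : Int) (j : Nat) : 0 ≤ Ssum x j := by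
  induction j with
  | zero => exact le_refl _
  | succ j ih => have := chooseZ_nonneg x (j + 1); simp only [Ssum]; omega

lemma bLoopB_char (k N : Int) (hk : 1 ≤ k) (hN : 1 ≤ N)
    (hkN : N ≤ Ssum N k.toNat) :
    ∀ (fuel : Nat) (m : Int), 0 ≤ m →
      (∀ j, 0 ≤ j → j ≤ m → ¬ (N ≤ Ssum j k.toNat)) →
      (N - m).toNat < fuel →
      (m < bLoopB k N fuel (Drow k m) m ∧
        N ≤ Ssum (bLoopB k N fuel (Drow k m) m) k.toNat ∧
        ∀ j, 0 ≤ j → j < bLoopB k N fuel (Drow k m) m → ¬ (N ≤ Ssum j k.toNat)) := by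
  intro fuel
  induction fuel with
  | zero =>
    intro m hm hinv hfuel
    exfalso
    have hmN : m < N := by
      by_contra hge
      have hge' : N ≤ m := by omega
      exact hinv m hm (le_refl m) (le_trans hkN (Ssum_mono_x (by omega) hge' k.toNat))
    omega
  | succ fuel ih =>
    intro m hm hinv hfuel
    rw [bLoopB]
    simp only [dpStepB_Drow k m hk hm, Drow_get_k k (m + 1) (by omega)]
    by_cases hcond : Ssum (m + 1) k.toNat ≥ N
    · rw [if_pos hcond]
      exact ⟨by omega, hcond, fun j hj1 hj2 => hinv j hj1 (by omega)⟩
    · rw [if_neg hcond]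
      have hmN : m + 1 < N := by
        by_contra hge
        have hge' : N ≤ m + 1 := by omega
        exact hcond (le_trans hkN (Ssum_mono_x (by omega) hge' k.toNat))
      have hrec := ih (m + 1) (by omega) ?_ (by omega)
      · exact ⟨by omega, hrec.2.1, hrec.2.2⟩
      · intro j hj1 hj2
        rcases lt_or_ge j (m + 1) with h' | h'
        · exact hinv j hj1 (by omega)
        · have : j = m + 1 := by omega
          subst this; omega

lemma bitLen_pos (N : Int) (hN : 1 ≤ N) : 1 ≤ (PySem.Int.bitLength N : Int) := by
  by_contra h'
  have h0 : PySem.Int.bitLength N = 0 := by omega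
  have h := PySem.Int.lt_two_pow_bitLength N
  rw [h0] at h
  simp at h
  omega

lemma N_le_two_pow_bitLen (N : Int) (hN : 1 ≤ N) :
    N ≤ 2 ^ (PySem.Int.bitLength N) - 1 := by
  have h := PySem.Int.lt_two_pow_bitLength N
  have h2 : N.natAbs = N.toNat := by omega
  have h3 : (N.toNat : Int) < ((2 ^ PySem.Int.bitLength N : Nat) : Int) := by
    exact_mod_cast h2 ▸ h
  have h4 : ((2 ^ PySem.Int.bitLength N : Nat) : Int) = 2 ^ (PySem.Int.bitLength N) := by
    push_cast; ring
  omega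

-- B's result is also the least x ≥ 1 covering N floors with K eggs (K ≥ 2, N ≥ 1):
-- capping the egg count at bitLength N changes no coverage test below the result
lemma B_char (K N : Int) (hK : 1 ≤ K) (hK1 : K ≠ 1) (hN : 1 ≤ N) :
    (1 ≤ doit_math_binary_search_alt K N ∧ CoverP K N (doit_math_binary_search_alt K N) ∧
      ∀ y, 1 ≤ y → y < doit_math_binary_search_alt K N → ¬ CoverP K N y) := by
  unfold doit_math_binary_search_alt
  rw [if_neg hK1]
  set bl : Int := (PySem.Int.bitLength N : Int) with hbl
  have hblpos : 1 ≤ bl := bitLen_pos N hN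
  set kk : Int := if K < bl then K else bl with hkk
  have hkk1 : 1 ≤ kk := by rw [hkk]; split <;> omega
  have hcov : N ≤ Ssum N kk.toNat := by
    have h1 : Ssum N 1 ≤ Ssum N kk.toNat := Ssum_mono_j N (by omega)
    have h2 : Ssum N 1 = N := Ssum_one N (by omega)
    omega
  have hinit := Drow_init kk (by omega)
  have hmain := bLoopB_char kk N hkk1 hN hcov (N.toNat + 1) 0 (by omega)
    (by
      intro j h1 h2
      have : j = 0 := by omega
      subst this
      rw [Ssum_zero_left]
      omega)
    (by omega)
  rw [← hinit] at hmain
  obtain ⟨hpos, hcovr, hinv⟩ := hmain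
  set r := bLoopB kk N (N.toNat + 1) (List.replicate (kk + 1).toNat 0) 0 with hr
  have hr1 : 1 ≤ r := by omega
  by_cases hcase : K < bl
  · -- kk = K: the coverage predicate is literally CoverP
    have hkkK : kk = K := by rw [hkk, if_pos hcase]
    rw [hkkK] at hcovr hinv
    exact ⟨hr1, hcovr, fun y hy1 hy2 => hinv y (by omega) hy2⟩
  · -- kk = bl ≤ K: below bl moves the K-egg and bl-egg sums agree
    have hkkbl : kk = bl := by rw [hkk, if_neg hcase]
    have hblK : bl ≤ K := by omega
    have hconv : ∀ x : Int, 0 ≤ x → x ≤ bl → Ssum x K.toNat = Ssum x kk.toNat := by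
      intro x hx hxbl
      have hxk : x.toNat ≤ kk.toNat := by omega
      have hxK : x.toNat ≤ K.toNat := by omega
      rw [Ssum_stab x (le_refl x.toNat) hxK, Ssum_stab x (le_refl x.toNat) hxk]
    -- coverage at bl moves with kk = bl eggs: the full row 2^bl - 1 ≥ N
    have hcovbl : N ≤ Ssum bl kk.toNat := by
      have hfull : Ssum bl bl.toNat = 2 ^ bl.toNat - 1 := by
        have h := Ssum_full bl.toNat
        rwa [show ((bl.toNat : Nat) : Int) = bl by omega] at h
      have hNle := N_le_two_pow_bitLen N hN
      have hblt : bl.toNat = PySem.Int.bitLength N := by omega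
      rw [hkkbl, hfull, hblt]
      exact hNle
    have hrbl : r ≤ bl := by
      by_contra h'
      exact hinv bl (by omega) (by omega) hcovbl
    refine ⟨hr1, ?_, ?_⟩
    · unfold CoverP
      rw [hconv r (by omega) hrbl]
      exact hcovr
    · intro y hy1 hy2
      unfold CoverP
      rw [hconv y (by omega) (by omega)]
      exact hinv y (by omega) hy2

-- two least witnesses agree
lemma least_unique {K N a b : Int}
    (ha : 1 ≤ a ∧ CoverP K N a ∧ ∀ y, 1 ≤ y → y < a → ¬ CoverP K N y)
    (hb : 1 ≤ b ∧ CoverP K N b ∧ ∀ y, 1 ≤ y → y < b → ¬ CoverP K N y) : a = b := by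
  obtain ⟨ha1, ha2, ha3⟩ := ha
  obtain ⟨hb1, hb2, hb3⟩ := hb
  rcases lt_trichotomy a b with h | h | h
  · exact absurd ha2 (hb3 a ha1 h)
  · exact h
  · exact absurd hb2 (ha3 b hb1 h)

-- B on K = 1 returns max N 1, the least covering move count with one egg
lemma B_one_egg (N : Int) (hN : 1 ≤ N) :
    (1 ≤ doit_math_binary_search_alt 1 N ∧ CoverP 1 N (doit_math_binary_search_alt 1 N) ∧
      ∀ y, 1 ≤ y → y < doit_math_binary_search_alt 1 N → ¬ CoverP 1 N y) := by
  have hB : doit_math_binary_search_alt 1 N = N := by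
    unfold doit_math_binary_search_alt
    rw [if_pos rfl]
    omega
  rw [hB]
  have h1 : ((1:Int)).toNat = 1 := rfl
  refine ⟨hN, ?_, ?_⟩
  · unfold CoverP
    rw [h1, Ssum_one N (by omega)]
  · intro y hy1 hy2
    unfold CoverP
    rw [h1, Ssum_one y (by omega)]
    omega

-- A on N ≤ 0 returns 1 (the search interval [1, N] is empty)
lemma A_nonpos (K N : Int) (hN : N ≤ 0) : doit_math_binary_search K N = 1 := by
  unfold doit_math_binary_search
  rw [bsA]
  simp [show ¬ ((1:Int) < N) by omega]

-- B on N ≤ 0 also returns 1: its first tried move count already covers N ≤ 0 floors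
lemma B_nonpos (K N : Int) (hK : 1 ≤ K) (hN : N ≤ 0) : doit_math_binary_search_alt K N = 1 := by
  unfold doit_math_binary_search_alt
  by_cases h : K = 1
  · rw [if_pos h]; omega
  · rw [if_neg h]
    set bl : Int := (PySem.Int.bitLength N : Int) with hbl
    have hbl0 : 0 ≤ bl := by positivity
    set kk : Int := if K < bl then K else bl with hkk
    have hkk0 : 0 ≤ kk := by rw [hkk]; split <;> omega
    have hfuel : N.toNat + 1 = 1 := by omega
    rw [hfuel, bLoopB]
    show (if PySem.List.pyGetD (dpStepB kk (List.replicate (kk + 1).toNat 0)) kk 0 ≥ N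
        then (0:Int) + 1
        else bLoopB kk N 0 (dpStepB kk (List.replicate (kk + 1).toNat 0)) (0 + 1)) = 1
    have hval : PySem.List.pyGetD (dpStepB kk (List.replicate (kk + 1).toNat 0)) kk 0 ≥ N := by
      rcases eq_or_lt_of_le hkk0 with hk0 | hk1
      · -- kk = 0 (only N = 0 reaches this): the stepped row is [0]
        rw [← hk0]
        have hv : PySem.List.pyGetD (dpStepB 0 (List.replicate ((0:Int) + 1).toNat 0)) 0 0
            = 0 := by decide
        rw [hv]; omega
      · rw [Drow_init kk (by omega), dpStepB_Drow kk 0 (by omega) (le_refl 0),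
          show (0:Int) + 1 = 1 by ring, Drow_get_k kk 1 (by omega)]
        have := Ssum_nonneg 1 kk.toNat
        omega
    rw [if_pos hval]
    norm_num

-- ===== VERDICT (by name: the statement is the Claim_ definition above) =====
theorem doit_math_binary_search_spec : Claim_equal_doit_math_binary_search := by
  intro K N _ hPre
  unfold Spec_doit_math_binary_search
  unfold Pre_doit_math_binary_search at hPre
  rcases le_or_gt N 0 with hN | hN
  · rw [A_nonpos K N hN, B_nonpos K N hPre hN]
  · by_cases h1 : K = 1
    · subst h1
      exact least_unique (A_char 1 N (by omega) hN) (B_one_egg N hN)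
    · exact least_unique (A_char K N hPre hN) (B_char K N hPre h1 hN)
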